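-- pv_equiv track=rewrite | github.com/mmbnura/pyplay | emi calculator.py | format_indian_number
-- ===== SOURCE A (Python) =====
-- def format_indian_number(number):
--     number = number.replace(",", "")
--     if not number.isdigit():
--         return number
--     if len(number) <= 3:
--         return number
--     last3 = number[-3:]
--     rest = number[:-3]
--     parts = []
--     while len(rest) > 2:
--         parts.insert(0, rest[-2:])
--         rest = rest[:-2]
--     if rest:
--         parts.insert(0, rest)
--     return ",".join(parts) + "," + last3
-- ===== SOURCE B (Python) =====
-- def format_indian_number(number):
--     number = number.replace(",", "")
--     if not number.isdigit():
--         return number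
--     if len(number) <= 3:
--         return number
--     n = len(number)
--     return "".join(
--         ("," + c) if (i > 0 and n - i >= 3 and (n - i) % 2 == 1) else c
--         for i, c in enumerate(number)
--     )
-- ===== Notes on version B (the rewrite author's own statement) =====
-- stated objective: idiomatic
-- what changed: Replaces A's back-to-front slice-and-insert(0) grouping loop (last3/rest/while) with a single forward pass over enumerate(number) that inserts a comma before each position lying on an Indian-grouping boundary (trailing length >= 3 and odd).
import Mathlib
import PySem

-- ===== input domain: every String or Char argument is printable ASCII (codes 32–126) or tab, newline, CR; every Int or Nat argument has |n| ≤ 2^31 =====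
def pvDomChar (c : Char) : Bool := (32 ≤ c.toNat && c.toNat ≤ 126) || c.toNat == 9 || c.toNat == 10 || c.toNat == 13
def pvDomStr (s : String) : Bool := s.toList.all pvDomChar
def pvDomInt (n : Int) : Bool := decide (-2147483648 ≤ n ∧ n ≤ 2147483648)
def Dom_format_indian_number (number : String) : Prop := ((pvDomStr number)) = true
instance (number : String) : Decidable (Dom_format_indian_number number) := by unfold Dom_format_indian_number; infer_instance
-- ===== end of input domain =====

-- B replaces A's back-to-front slice-and-insert grouping loop with a single forward pass
-- that inserts a comma before each position at an Indian-grouping boundary (idiomatic, same cost).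

-- ===== PORT A =====
-- the 'while len(rest) > 2: parts.insert(0, rest[-2:]); rest = rest[:-2]' loop plus the final 'if rest: parts.insert(0, rest)'
def pvPartsLoop (rest : List Char) (parts : List (List Char)) : List (List Char) :=
  if 2 < rest.length then
    pvPartsLoop (PySem.Chars.slice rest none (some (-2)))
      ((PySem.Chars.slice rest (some (-2)) none) :: parts)
  else if rest ≠ [] then rest :: parts else parts
termination_by rest.length
decreasing_by
  rw [PySem.Chars.slice_eq_listSlice, PySem.List.slice_to_neg_ofNat rest 2 (by omega)]
  simp only [List.length_take]
  omega

def format_indian_number (number : String) : String :=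
  let number := PySem.Str.replace number "," ""
  if !(PySem.Str.strIsdigit number) then number
  else if PySem.Str.len number ≤ 3 then number
  else
    let cs := number.toList
    let last3 := PySem.Chars.slice cs (some (-3)) none
    let rest := PySem.Chars.slice cs none (some (-3))
    String.ofList (PySem.Chars.join [','] (pvPartsLoop rest []) ++ [','] ++ last3)

-- ===== PORT B =====
def format_indian_number_alt (number : String) : String :=
  let number := PySem.Str.replace number "," ""
  if !(PySem.Str.strIsdigit number) then number
  else if PySem.Str.len number ≤ 3 then number
  else
    let cs := number.toList
    let n : Int := cs.length
    String.ofList ((PySem.List.enumerate cs 0).flatMap (fun p =>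
      if 0 < p.1 ∧ 3 ≤ n - p.1 ∧ (n - p.1) % 2 = 1 then [',', p.2] else [p.2]))

-- ===== PRECONDITION & SPEC =====
def Spec_format_indian_number (number : String) (out : String) : Prop := out = format_indian_number_alt number
instance (number : String) (out : String) : Decidable (Spec_format_indian_number number out) := by unfold Spec_format_indian_number; infer_instance

-- ===== CLAIM (what is proved, stated in full; the proofs are below) =====
def Claim_equal_format_indian_number : Prop := ∀ (number : String), Dom_format_indian_number number → Spec_format_indian_number number (format_indian_number number)

-- ===== LEMMAS AND PROOFS =====

theorem pv_flatMap_congr {α β : Type} (l : List α) (f g : α → List β)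
    (h : ∀ a ∈ l, f a = g a) : l.flatMap f = l.flatMap g := by
  induction l with
  | nil => rfl
  | cons x xs ih =>
      simp only [List.flatMap_cons]
      rw [h x (by simp), ih (fun a ha => h a (by simp [ha]))]

theorem pv_join_append_single (s d : List Char) (xs : List (List Char)) (hxs : xs ≠ []) :
    PySem.Chars.join s (xs ++ [d]) = PySem.Chars.join s xs ++ s ++ d := by
  induction xs with
  | nil => exact absurd rfl hxs
  | cons x ys ih =>
      cases ys with
      | nil => simp [PySem.Chars.join_cons_cons, PySem.Chars.join_singleton]
      | cons y zs =>
          have := ih (by simp)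
          simp only [List.cons_append, PySem.Chars.join_cons_cons] at this ⊢
          rw [this]
          simp [List.append_assoc]

theorem pv_slice_take (rest : List Char) (_h : 2 < rest.length) :
    PySem.Chars.slice rest none (some (-2)) = rest.take (rest.length - 2) := by
  rw [PySem.Chars.slice_eq_listSlice, PySem.List.slice_to_neg_ofNat rest 2 (by omega)]

theorem pv_slice_drop (rest : List Char) (_h : 2 < rest.length) :
    PySem.Chars.slice rest (some (-2)) none = rest.drop (rest.length - 2) := by
  rw [PySem.Chars.slice_eq_listSlice, PySem.List.slice_from_neg_ofNat rest 2 (by omega)]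

theorem pvPartsLoop_acc (n : Nat) : ∀ (rest : List Char), rest.length ≤ n →
    ∀ parts, pvPartsLoop rest parts = pvPartsLoop rest [] ++ parts := by
  induction n with
  | zero =>
      intro rest h parts
      have : rest = [] := List.length_eq_zero_iff.mp (Nat.le_zero.mp h)
      subst this
      simp [pvPartsLoop]
  | succ n ih =>
      intro rest h parts
      rw [pvPartsLoop]
      conv_rhs => rw [pvPartsLoop]
      by_cases h2 : 2 < rest.length
      · simp only [if_pos h2]
        have hlen : (PySem.Chars.slice rest none (some (-2))).length ≤ n := by
          rw [pv_slice_take rest h2]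
          simp only [List.length_take]; omega
        rw [ih _ hlen]
        conv_rhs => rw [ih _ hlen]
        simp
      · simp only [if_neg h2]
        by_cases hne : rest = [] <;> simp [hne]

theorem pvPartsLoop_ne_nil (rest : List Char) (h : rest ≠ []) : pvPartsLoop rest [] ≠ [] := by
  rw [pvPartsLoop]
  by_cases h2 : 2 < rest.length
  · simp only [if_pos h2]
    rw [pvPartsLoop_acc (PySem.Chars.slice rest none (some (-2))).length _ le_rfl]
    simp
  · simp [if_neg h2, h]

-- A's grouping of the 'rest' part equals a forward comma-insertion pass over it
theorem pv_rest_eq (n : Nat) : ∀ (rest : List Char) (M : Int), rest.length ≤ n →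
    M = rest.length →
    PySem.Chars.join [','] (pvPartsLoop rest []) =
      (PySem.List.enumerate rest 0).flatMap (fun p =>
        if 0 < p.1 ∧ (M - p.1) % 2 = 0 then [',', p.2] else [p.2]) := by
  induction n with
  | zero =>
      intro rest M h hM
      have : rest = [] := List.length_eq_zero_iff.mp (Nat.le_zero.mp h)
      subst this
      simp [pvPartsLoop, PySem.Chars.join_nil, PySem.List.enumerate_nil]
  | succ n ih =>
      intro rest M h hM
      by_cases h2 : 2 < rest.length
      · have hsplit : rest = rest.take (rest.length - 2) ++ rest.drop (rest.length - 2) :=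
          (List.take_append_drop _ _).symm
        have hdlen : (rest.drop (rest.length - 2)).length = 2 := by simp; omega
        obtain ⟨a, b, hd⟩ := List.length_eq_two.mp hdlen
        have htlen : (rest.take (rest.length - 2)).length = rest.length - 2 := by simp
        have htne : rest.take (rest.length - 2) ≠ [] := by
          intro hc; rw [hc] at htlen; simp at htlen; omega
        rw [pvPartsLoop, if_pos h2, pv_slice_take rest h2, pv_slice_drop rest h2]
        rw [pvPartsLoop_acc (rest.take (rest.length - 2)).length _ le_rfl]
        rw [pv_join_append_single _ _ _ (pvPartsLoop_ne_nil _ htne)]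
        rw [ih (rest.take (rest.length - 2)) (M - 2) (by rw [htlen]; omega) (by rw [htlen]; omega)]
        conv_rhs => rw [hsplit]
        rw [PySem.List.enumerate_append, List.flatMap_append, hd]
        rw [PySem.List.enumerate_cons, PySem.List.enumerate_cons, PySem.List.enumerate_nil]
        simp only [List.flatMap_cons, List.flatMap_nil, htlen]
        rw [if_pos (⟨by omega, by omega⟩ :
              0 < (0 + ((rest.length - 2 : Nat) : Int)) ∧
                (M - (0 + ((rest.length - 2 : Nat) : Int))) % 2 = 0),
            if_neg (fun hc : 0 < (0 + ((rest.length - 2 : Nat) : Int) + 1) ∧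
                (M - (0 + ((rest.length - 2 : Nat) : Int) + 1)) % 2 = 0 => by omega)]
        rw [pv_flatMap_congr (PySem.List.enumerate (rest.take (rest.length - 2)) 0)
          (fun p => if 0 < p.1 ∧ (M - 2 - p.1) % 2 = 0 then [',', p.2] else [p.2])
          (fun p => if 0 < p.1 ∧ (M - p.1) % 2 = 0 then [',', p.2] else [p.2]) ?_]
        · simp [List.append_assoc]
        · intro p _
          dsimp only
          by_cases h0 : 0 < p.1
          · by_cases hpar : (M - p.1) % 2 = 0
            · rw [if_pos ⟨h0, by omega⟩, if_pos ⟨h0, hpar⟩]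
            · rw [if_neg (fun hc => by omega), if_neg (by tauto)]
          · rw [if_neg (by tauto), if_neg (by tauto)]
      · rw [pvPartsLoop, if_neg h2]
        rcases rest with _ | ⟨a, rest1⟩
        · simp [PySem.Chars.join_nil, PySem.List.enumerate_nil]
        · rcases rest1 with _ | ⟨b, rest2⟩
          · simp only [ne_eq, reduceCtorEq, not_false_eq_true, if_true]
            rw [PySem.Chars.join_singleton]
            rw [PySem.List.enumerate_cons, PySem.List.enumerate_nil]
            simp
          · rcases rest2 with _ | ⟨c, rest3⟩
            · simp only [ne_eq, reduceCtorEq, not_false_eq_true, if_true]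
              rw [PySem.Chars.join_singleton]
              rw [PySem.List.enumerate_cons, PySem.List.enumerate_cons, PySem.List.enumerate_nil]
              simp only [List.flatMap_cons, List.flatMap_nil]
              simp only [List.length_cons, List.length_nil] at hM
              rw [if_neg (by norm_num), if_neg (fun hc : (0:Int) < 0 + 1 ∧ (M - (0 + 1)) % 2 = 0 => by omega)]
              simp
            · simp only [List.length_cons] at h2; omega

-- the whole else-branch: A's join/last3 assembly equals B's single pass over all of cs
theorem pv_main (cs : List Char) (h : 3 < cs.length) :
    PySem.Chars.join [','] (pvPartsLoop (PySem.Chars.slice cs none (some (-3))) []) ++ [','] ++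
        PySem.Chars.slice cs (some (-3)) none =
      (PySem.List.enumerate cs 0).flatMap (fun p =>
        if 0 < p.1 ∧ 3 ≤ (cs.length : Int) - p.1 ∧ ((cs.length : Int) - p.1) % 2 = 1
        then [',', p.2] else [p.2]) := by
  have hsplit : cs = cs.take (cs.length - 3) ++ cs.drop (cs.length - 3) :=
    (List.take_append_drop _ _).symm
  have htlen : (cs.take (cs.length - 3)).length = cs.length - 3 := by simp
  have hdlen : (cs.drop (cs.length - 3)).length = 3 := by simp; omega
  obtain ⟨a, b, c, habc⟩ := List.length_eq_three.mp hdlen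
  rw [PySem.Chars.slice_eq_listSlice, PySem.List.slice_to_neg_ofNat cs 3 (by omega),
      PySem.Chars.slice_eq_listSlice, PySem.List.slice_from_neg_ofNat cs 3 (by omega)]
  rw [pv_rest_eq (cs.take (cs.length - 3)).length _ ((cs.length : Int) - 3) le_rfl (by rw [htlen]; omega)]
  conv_rhs => rw [hsplit]
  rw [PySem.List.enumerate_append, List.flatMap_append, habc]
  rw [PySem.List.enumerate_cons, PySem.List.enumerate_cons, PySem.List.enumerate_cons,
      PySem.List.enumerate_nil]
  have hlen2 : (List.take (cs.length - 3) cs ++ [a, b, c]).length = cs.length := by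
    simp; omega
  simp only [List.flatMap_cons, List.flatMap_nil, htlen, hlen2]
  rw [if_pos (⟨by omega, by omega, by omega⟩ :
        0 < (0 + ((cs.length - 3 : Nat) : Int)) ∧
          3 ≤ (cs.length : Int) - (0 + ((cs.length - 3 : Nat) : Int)) ∧
          ((cs.length : Int) - (0 + ((cs.length - 3 : Nat) : Int))) % 2 = 1),
      if_neg (fun hc : 0 < (0 + ((cs.length - 3 : Nat) : Int) + 1) ∧
          3 ≤ (cs.length : Int) - (0 + ((cs.length - 3 : Nat) : Int) + 1) ∧
          ((cs.length : Int) - (0 + ((cs.length - 3 : Nat) : Int) + 1)) % 2 = 1 => by omega),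
      if_neg (fun hc : 0 < (0 + ((cs.length - 3 : Nat) : Int) + 1 + 1) ∧
          3 ≤ (cs.length : Int) - (0 + ((cs.length - 3 : Nat) : Int) + 1 + 1) ∧
          ((cs.length : Int) - (0 + ((cs.length - 3 : Nat) : Int) + 1 + 1)) % 2 = 1 => by omega)]
  rw [pv_flatMap_congr (PySem.List.enumerate (cs.take (cs.length - 3)) 0)
    (fun p => if 0 < p.1 ∧ ((cs.length : Int) - 3 - p.1) % 2 = 0 then [',', p.2] else [p.2])
    (fun p => if 0 < p.1 ∧ 3 ≤ (cs.length : Int) - p.1 ∧ ((cs.length : Int) - p.1) % 2 = 1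
      then [',', p.2] else [p.2]) ?_]
  · simp [List.append_assoc]
  · intro p hp
    dsimp only
    obtain ⟨k, hk, hpk⟩ := (PySem.List.mem_enumerate_iff _ _ _).mp hp
    subst hpk
    simp only [htlen] at hk
    by_cases h0 : 0 < ((0 : Int) + k)
    · by_cases hpar : ((cs.length : Int) - 3 - (0 + k)) % 2 = 0
      · rw [if_pos ⟨h0, hpar⟩, if_pos ⟨h0, by omega, by omega⟩]
      · rw [if_neg (by tauto), if_neg (fun hc => by omega)]
    · rw [if_neg (by tauto), if_neg (by tauto)]

-- ===== VERDICT (by name: the statement is the Claim_ definition above) =====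
theorem format_indian_number_spec : Claim_equal_format_indian_number := by
  intro number _
  unfold Spec_format_indian_number format_indian_number format_indian_number_alt
  dsimp only
  split_ifs with h1 h2
  · rfl
  · rfl
  · have hlen : 3 < (PySem.Str.replace number "," "").toList.length := by
      have h3 := PySem.Str.len_eq (PySem.Str.replace number "," "")
      omega
    exact congrArg String.ofList (pv_main _ hlen)
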